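-- pv_equiv track=rewrite | github.com/mahmoodhamdi/esports-flask | app/enhanced_search_extended.py | apply_filters_extended
-- ===== SOURCE A (Python) =====
-- def apply_filters_extended(results, filters):
--     """Apply additional filters to search results"""
--     if not filters:
--         return results
--
--     filtered_results = {}
--
--     for table_name, table_results in results.items():
--         filtered_table_results = []
--
--         for result in table_results:
--             include_result = True
--
--             for filter_key, filter_value in filters.items():
--                 if filter_key in result:
--                     result_value = str(result[filter_key]).lower()
--                     filter_value = str(filter_value).lower()
--
--                     if filter_value not in result_value:
--                         include_result = False
--                         break
--
--             if include_result:
--                 filtered_table_results.append(result)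
--
--         filtered_results[table_name] = filtered_table_results
--
--     return filtered_results
-- ===== SOURCE B (Python) =====
-- def apply_filters_extended(results, filters):
--     """Apply additional filters to search results: one filtering pass per filter."""
--     if not filters:
--         return results
--
--     needles = [(fk, str(fv).lower()) for fk, fv in filters.items()]
--
--     filtered = {}
--     for table_name, table_results in results.items():
--         kept = table_results
--         for fk, needle in needles:
--             kept = [r for r in kept if fk not in r or needle in str(r[fk]).lower()]
--         filtered[table_name] = list(kept)
--     return filtered
-- ===== Notes on version B (the rewrite author's own statement) =====
-- stated objective: alternative
-- what changed: Instead of testing every filter per result with a flag and early break, B applies each filter as its own full filtering pass over a shrinking kept-list (a fold of list comprehensions over the filters), which is correct because the per-filter predicates are independent and list order is preserved by each pass.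
import Mathlib
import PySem

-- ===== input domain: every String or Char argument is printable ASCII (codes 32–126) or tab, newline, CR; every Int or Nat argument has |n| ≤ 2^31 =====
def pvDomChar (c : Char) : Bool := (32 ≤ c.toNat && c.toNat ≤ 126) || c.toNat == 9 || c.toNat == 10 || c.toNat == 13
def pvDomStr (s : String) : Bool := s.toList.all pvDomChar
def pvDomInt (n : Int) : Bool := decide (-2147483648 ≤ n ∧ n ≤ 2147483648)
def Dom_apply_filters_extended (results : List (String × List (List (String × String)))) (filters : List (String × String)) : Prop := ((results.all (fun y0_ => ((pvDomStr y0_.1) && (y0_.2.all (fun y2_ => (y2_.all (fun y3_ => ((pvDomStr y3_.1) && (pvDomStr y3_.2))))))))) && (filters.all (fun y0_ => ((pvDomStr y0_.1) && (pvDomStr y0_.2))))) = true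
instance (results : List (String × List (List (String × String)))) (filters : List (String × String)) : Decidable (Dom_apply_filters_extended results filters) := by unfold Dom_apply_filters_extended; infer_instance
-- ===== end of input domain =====

-- ===== PORT A =====
-- B replaces A's per-result flag/break scan of all filters by one filtering pass per filter
-- over a shrinking kept-list (objective: alternative decomposition, same cost).
-- A: per result, check every filter with an early break (include_result flag).
-- 'filter_key in result' / 'result[filter_key]': first-match lookup on the row assoc list.
-- 'str(...)' on a string is the identity; '.lower()' is PySem.Str.lower; 'in' on strings is PySem.Str.isIn.
def pvCheckA (result : List (String × String)) : List (String × String) → Bool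
  | [] => true
  | (filter_key, filter_value) :: rest =>
    match result.lookup filter_key with
    | some result_value =>
      if PySem.Str.isIn (PySem.Str.lower filter_value) (PySem.Str.lower result_value) then
        pvCheckA result rest
      else false  -- include_result = False; break
    | none => pvCheckA result rest

def apply_filters_extended (results : List (String × List (List (String × String)))) (filters : List (String × String)) : List (String × List (List (String × String))) :=
  if filters = [] then results
  else results.map (fun t => (t.1, t.2.filter (fun result => pvCheckA result filters)))

-- ===== PORT B =====
-- one filter applied as one pass: kept = [r for r in kept if fk not in r or needle in str(r[fk]).lower()]
def pvApplyOne (fk needle : String) (kept : List (List (String × String))) : List (List (String × String)) :=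
  kept.filter (fun r =>
    match r.lookup fk with
    | none => true
    | some rv => PySem.Str.isIn needle (PySem.Str.lower rv))

def apply_filters_extended_alt (results : List (String × List (List (String × String)))) (filters : List (String × String)) : List (String × List (List (String × String))) :=
  if filters = [] then results
  else
    -- needles = [(fk, str(fv).lower()) for fk, fv in filters.items()]
    let needles := filters.map (fun p => (p.1, PySem.Str.lower p.2))
    results.map (fun t =>
      (t.1, needles.foldl (fun kept p => pvApplyOne p.1 p.2 kept) t.2))

-- ===== PRECONDITION & SPEC =====
def Spec_apply_filters_extended (results : List (String × List (List (String × String)))) (filters : List (String × String)) (out : List (String × List (List (String × String)))) : Prop := out = apply_filters_extended_alt results filters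
instance (results : List (String × List (List (String × String)))) (filters : List (String × String)) (out : List (String × List (List (String × String)))) : Decidable (Spec_apply_filters_extended results filters out) := by unfold Spec_apply_filters_extended; infer_instance

-- ===== CLAIM =====
def Claim_equal_apply_filters_extended : Prop := ∀ (results : List (String × List (List (String × String)))) (filters : List (String × String)), Dom_apply_filters_extended results filters → Spec_apply_filters_extended results filters (apply_filters_extended results filters)

-- ===== LEMMAS AND PROOFS =====

-- A's head test, split off as a conjunct.
lemma pvCheckA_cons (r : List (String × String)) (a b : String) (rest : List (String × String)) :
    pvCheckA r ((a, b) :: rest)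
      = ((match r.lookup a with
          | some rv => PySem.Str.isIn (PySem.Str.lower b) (PySem.Str.lower rv)
          | none => true) && pvCheckA r rest) := by
  simp only [pvCheckA]
  cases r.lookup a with
  | none => simp
  | some rv => cases PySem.Str.isIn (PySem.Str.lower b) (PySem.Str.lower rv) <;> simp

-- B's sequential per-filter passes compute the same rows as A's per-row scan of all filters.
lemma pv_fold_eq_filter (fs : List (String × String)) (rows : List (List (String × String))) :
    (fs.map (fun p => (p.1, PySem.Str.lower p.2))).foldl (fun kept p => pvApplyOne p.1 p.2 kept) rows
      = rows.filter (fun r => pvCheckA r fs) := by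
  induction fs generalizing rows with
  | nil => simp [pvCheckA]
  | cons p rest ih =>
    obtain ⟨a, b⟩ := p
    rw [List.map_cons, List.foldl_cons, ih, pvApplyOne, List.filter_filter]
    refine List.filter_congr (fun r _ => ?_)
    rw [pvCheckA_cons]
    cases List.lookup a r with
    | none => simp
    | some rv => simp [Bool.and_comm]

-- ===== VERDICT =====
theorem apply_filters_extended_spec : Claim_equal_apply_filters_extended := by
  intro results filters _
  unfold Spec_apply_filters_extended apply_filters_extended apply_filters_extended_alt
  by_cases h : filters = []
  · simp [h]
  · simp only [if_neg h]
    exact List.map_congr_left (fun t _ => by rw [pv_fold_eq_filter])
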